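-- pv_equiv track=rewrite | github.com/human02/Interview-Preparation | dsa/hash_table/lottery_count_largest_grp.py | findGroup_memo
-- ===== SOURCE A (Python) =====
-- def findGroup_memo(lowVal, highVal):
--
--     memo = {}
--
--     def helper(num):
--         if num == 0:
--             return 0
--         if num in memo:
--             return memo[num]
--
--         memo[num] = (num % 10) + helper(num // 10)
--         return memo[num]
--
--     mpp = {}
--     for i in range(lowVal, highVal + 1):
--         mpp[helper(i)] = mpp.get(helper(i), 0) + 1
--
--     maxCount = max(mpp.values())
--     res = sum(1 for val in mpp.values() if val == maxCount)
--
--     return [maxCount, res]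
-- ===== SOURCE B (Python) =====
-- def findGroup_memo(lowVal, highVal):
--     S = 101
--     tables = {}
--     def G(n):
--         if n < 0:
--             return [0] * S
--         if n == 0:
--             return [1] + [0] * (S - 1)
--         if n in tables:
--             return tables[n]
--         q, r = divmod(n, 10)
--         a = G(q)
--         b = G(q - 1)
--         out = [sum((a if d <= r else b)[s - d] for d in range(10) if d <= s)
--                for s in range(S)]
--         tables[n] = out
--         return out
--     cnt = [h - l for h, l in zip(G(highVal), G(lowVal - 1))]
--     best = max(c for c in cnt if c > 0)
--     return [best, cnt.count(best)]
-- ===== Notes on version B (the rewrite author's own statement) =====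
-- stated objective: faster
-- what changed: B never enumerates the range: it builds, by a memoized recursion on n//10 (digit DP), the table of how many numbers in [0,n] have each possible digit sum, differences the tables for highVal and lowVal-1, and reads the maximum and its tie count off that table, instead of A's per-number digit-sum loop over the whole range.
import Mathlib
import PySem

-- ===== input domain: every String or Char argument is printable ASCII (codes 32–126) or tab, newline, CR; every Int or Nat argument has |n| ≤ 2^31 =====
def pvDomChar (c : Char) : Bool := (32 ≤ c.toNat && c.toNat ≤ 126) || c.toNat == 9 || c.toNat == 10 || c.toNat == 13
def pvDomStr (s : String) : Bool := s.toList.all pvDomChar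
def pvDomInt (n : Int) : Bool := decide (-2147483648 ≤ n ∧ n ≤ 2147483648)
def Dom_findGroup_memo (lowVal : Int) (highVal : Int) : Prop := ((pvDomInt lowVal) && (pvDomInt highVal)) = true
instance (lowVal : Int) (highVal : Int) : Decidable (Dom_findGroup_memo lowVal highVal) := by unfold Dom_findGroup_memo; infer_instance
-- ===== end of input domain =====

-- B replaces A's per-number scan of [low, high] by a digit-DP table (counts per digit sum
-- for [0, n], built by a memoized recursion on n // 10), differenced at highVal and
-- lowVal - 1: measurably faster, independent of the range width.


-- ===== PORT A =====

-- A's closure 'helper' with its memo dict threaded through (Python mutates the closure dict).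
-- The memo is used only through 'num in memo' / 'memo[num]' / 'memo[num] = v' on Int keys and
-- its iteration order is never observed, so Std.HashMap models the Python dict exactly here
-- (a list-backed dict would make evaluation of the port quadratic in the range width).
-- For num < 0 Python recurses forever (RecursionError): the 'num < 0' guard only totalises
-- the Lean function; those inputs are outside Pre_findGroup_memo.
def helperA (num : Int) (memo : Std.HashMap Int Int) : Int × Std.HashMap Int Int :=
  if num = 0 then (0, memo)
  else if num < 0 then (0, memo)
  else
    match memo[num]? with
    | some v => (v, memo)
    | none =>
      let p := helperA (PySem.Int.floordiv num 10) memo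
      let v := PySem.Int.mod num 10 + p.1
      (v, p.2.insert num v)
termination_by num.toNat
decreasing_by
  rw [PySem.Int.floordiv_eq_ediv_of_pos (by norm_num)]
  omega

def findGroup_memo (lowVal : Int) (highVal : Int) : List Int :=
  let st := (PySem.List.pyRange lowVal (highVal + 1) 1).foldl
    (fun st i =>
      let r1 := helperA i st.1            -- helper(i) inside mpp.get(helper(i), 0)
      let newv := st.2.getD r1.1 0 + 1
      let r2 := helperA i r1.2            -- helper(i) computing the assigned key
      (r2.2, st.2.insert r2.1 newv))
    ((∅ : Std.HashMap Int Int), PySem.Dict.empty)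
  match PySem.List.max? st.2.values (fun v => v) with
  | none => []                            -- Python: max() raises ValueError (empty dict); outside Pre_
  | some maxCount =>
    [maxCount, st.2.values.foldl (fun acc val => if val = maxCount then acc + 1 else acc) 0]

-- ===== PORT B =====

-- Source B's G with its memo dict 'tables' threaded through (Python mutates the closure dict).
-- 'tables' is used only through 'n in tables' / 'tables[n]' / 'tables[n] = out' on Int keys and
-- its iteration order is never observed, so Std.HashMap models the Python dict exactly here.
-- G returns the per-digit-sum count table for [0, n], for the 101 digit sums s < 101
-- (all indices s - d taken below are < 101 = length of a and b, so getD never defaults).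
def altGM (n : Int) (tables : Std.HashMap Int (List Int)) : List Int × Std.HashMap Int (List Int) :=
  if n < 0 then (List.replicate 101 0, tables)
  else if n = 0 then (1 :: List.replicate 100 0, tables)
  else
    match tables[n]? with
    | some t => (t, tables)
    | none =>
      let q := PySem.Int.floordiv n 10
      let r := PySem.Int.mod n 10
      let pa := altGM q tables
      let pb := altGM (q - 1) pa.2
      let out := (List.range 101).map (fun s =>
        (((List.range 10).filter (fun d => d ≤ s)).map
          (fun (d : Nat) => (if (d : Int) ≤ r then pa.1 else pb.1).getD (s - d : Nat) 0)).sum)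
      (out, pb.2.insert n out)
termination_by n.toNat
decreasing_by
  · rw [PySem.Int.floordiv_eq_ediv_of_pos (by norm_num)]; omega
  · rw [PySem.Int.floordiv_eq_ediv_of_pos (by norm_num)]; omega

def findGroup_memo_alt (lowVal : Int) (highVal : Int) : List Int :=
  let g1 := altGM highVal (∅ : Std.HashMap Int (List Int))
  let g2 := altGM (lowVal - 1) g1.2
  let cnt := (g1.1.zip g2.1).map (fun p => p.1 - p.2)
  match PySem.List.max? (cnt.filter (fun c => decide (0 < c))) (fun v => v) with
  | none => []                            -- Python: max() of an empty generator raises ValueError; outside Pre_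
  | some best => [best, (cnt.count best : Int)]

-- ===== PRECONDITION & SPEC =====
-- Pre_ excludes exactly the inputs on which Python A raises: lowVal > highVal (max() of an
-- empty dict: ValueError) and lowVal < 0 (helper recurses forever on negatives: RecursionError).
def Pre_findGroup_memo (lowVal : Int) (highVal : Int) : Prop := 0 ≤ lowVal ∧ lowVal ≤ highVal
instance (lowVal : Int) (highVal : Int) : Decidable (Pre_findGroup_memo lowVal highVal) := by unfold Pre_findGroup_memo; infer_instance

def pvWitness_findGroup_memo : Int × Int := (0, 12)

def Spec_findGroup_memo (lowVal : Int) (highVal : Int) (out : List Int) : Prop := out = findGroup_memo_alt lowVal highVal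
instance (lowVal : Int) (highVal : Int) (out : List Int) : Decidable (Spec_findGroup_memo lowVal highVal out) := by unfold Spec_findGroup_memo; infer_instance

-- ===== CLAIM (what is proved, stated in full; the proofs are below) =====
def Claim_equal_findGroup_memo : Prop := ∀ (lowVal : Int) (highVal : Int), Dom_findGroup_memo lowVal highVal → Pre_findGroup_memo lowVal highVal → Spec_findGroup_memo lowVal highVal (findGroup_memo lowVal highVal)

-- ===== LEMMAS AND PROOFS =====

-- proof-side model of B's G: the same table, computed without the memo
def altG (n : Int) : List Int :=
  if n < 0 then List.replicate 101 0
  else if n = 0 then 1 :: List.replicate 100 0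
  else
    let q := PySem.Int.floordiv n 10
    let r := PySem.Int.mod n 10
    let a := altG q
    let b := altG (q - 1)
    (List.range 101).map (fun s =>
      (((List.range 10).filter (fun d => d ≤ s)).map
        (fun (d : Nat) => (if (d : Int) ≤ r then a else b).getD (s - d : Nat) 0)).sum)
termination_by n.toNat
decreasing_by
  · rw [PySem.Int.floordiv_eq_ediv_of_pos (by norm_num)]; omega
  · rw [PySem.Int.floordiv_eq_ediv_of_pos (by norm_num)]; omega

def pvDS : ℕ → ℕ
  | 0 => 0
  | n + 1 => (n + 1) % 10 + pvDS ((n + 1) / 10)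
decreasing_by exact Nat.div_lt_self (by omega) (by omega)
def pvCB (n s : ℕ) : ℕ := (List.range n).countP (fun x => decide (pvDS x = s))

lemma pvDS_eq (n : ℕ) : pvDS n = n % 10 + pvDS (n / 10) := by
  cases n with
  | zero => simp [pvDS]
  | succ k => rw [pvDS]
lemma pvCB_succ (n s : ℕ) : pvCB (n + 1) s = pvCB n s + (if pvDS n = s then 1 else 0) := by
  simp [pvCB, List.range_succ, List.countP_append, List.countP_cons]

lemma pvCB_rec (n s : ℕ) :
    pvCB n s = ∑ d ∈ Finset.range 10, (if d ≤ s then pvCB ((n - d + 9) / 10) (s - d) else 0) := by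
  induction n with
  | zero =>
    have : ∀ d ∈ Finset.range 10, (if d ≤ s then pvCB ((0 - d + 9) / 10) (s - d) else 0) = 0 := by
      intro d hd
      have hd10 : d < 10 := Finset.mem_range.mp hd
      have : (0 - d + 9) / 10 = 0 := by omega
      rw [this]
      split <;> simp [pvCB]
    rw [Finset.sum_eq_zero this]
    simp [pvCB]
  | succ n ih =>
    set d0 := n % 10 with hd0
    have hd0m : d0 ∈ Finset.range 10 := Finset.mem_range.mpr (by omega)
    rw [pvCB_succ, ih]
    rw [Finset.sum_eq_sum_diff_singleton_add hd0m, Finset.sum_eq_sum_diff_singleton_add hd0m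
      (fun d => if d ≤ s then pvCB ((n + 1 - d + 9) / 10) (s - d) else 0)]
    have hoff : ∀ d ∈ Finset.range 10 \ {d0},
        (if d ≤ s then pvCB ((n + 1 - d + 9) / 10) (s - d) else 0)
        = (if d ≤ s then pvCB ((n - d + 9) / 10) (s - d) else 0) := by
      intro d hd
      obtain ⟨hd10, hdne⟩ := Finset.mem_sdiff.mp hd
      have hd10' : d < 10 := Finset.mem_range.mp hd10
      have hdne' : d ≠ d0 := by simpa using hdne
      have : (n + 1 - d + 9) / 10 = (n - d + 9) / 10 := by omega
      rw [this]
    rw [Finset.sum_congr rfl hoff]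
    have hκ : (n + 1 - d0 + 9) / 10 = (n - d0 + 9) / 10 + 1 := by omega
    have hκ0 : (n - d0 + 9) / 10 = n / 10 := by omega
    rw [hκ, hκ0]
    have hds : pvDS n = d0 + pvDS (n / 10) := pvDS_eq n
    by_cases hle : d0 ≤ s
    · rw [if_pos hle, if_pos hle, pvCB_succ]
      have : (pvDS (n / 10) = s - d0) ↔ (pvDS n = s) := by
        rw [hds]; omega
      by_cases h2 : pvDS n = s
      · rw [if_pos (this.mpr h2), if_pos h2]; ring
      · rw [if_neg (fun hc => h2 (this.mp hc)), if_neg h2]; ring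
    · rw [if_neg hle, if_neg hle]
      have : pvDS n ≠ s := by rw [hds]; omega
      rw [if_neg this]

lemma sum_filter_bridge (s : ℕ) (g : ℕ → ℤ) :
    (((List.range 10).filter (fun d => decide (d ≤ s))).map g).sum
    = ∑ d ∈ Finset.range 10, if d ≤ s then g d else 0 := by
  rw [← Finset.sum_filter]; rfl

lemma altG_length (n : Int) : (altG n).length = 101 := by
  rw [altG]; split
  · simp
  · split <;> simp

lemma pvDS_le (k : ℕ) : ∀ n, n < 10 ^ k → pvDS n ≤ 9 * k := by
  induction k with
  | zero => intro n h; interval_cases n; simp [pvDS]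
  | succ k ih =>
    intro n h
    rw [pvDS_eq n]
    have h1 : n / 10 < 10 ^ k := Nat.div_lt_of_lt_mul (by rw [← pow_succ']; exact h)
    have := ih (n / 10) h1
    omega

lemma altG_spec : ∀ (N : ℕ) (n : Int), n.toNat = N → ∀ s : ℕ, s < 101 →
    (altG n).getD s 0 = (pvCB (n + 1).toNat s : Int) := by
  intro N
  induction N using Nat.strong_induction_on with
  | _ N ih =>
    intro n hN s hs
    by_cases hneg : n < 0
    · rw [altG, if_pos hneg]
      have h1 : (n + 1).toNat = 0 := by omega
      rw [h1]
      have hz : (List.replicate 101 (0:Int)).getD s 0 = 0 := by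
        simp only [List.getD_eq_getElem?_getD, List.getElem?_replicate]
        split <;> simp
      rw [hz]
      simp [pvCB]
    · by_cases h0 : n = 0
      · subst h0
        rw [altG]
        norm_num
        have hc : (pvCB 1 s : Int) = if s = 0 then 1 else 0 := by
          by_cases h : s = 0 <;> simp [pvCB, List.range_succ, pvDS, h, eq_comm]
        rw [hc]
        cases s with
        | zero => simp
        | succ t =>
          rw [if_neg (by omega)]
          show (List.replicate 100 (0:Int)).getD t 0 = 0
          simp only [List.getD_eq_getElem?_getD, List.getElem?_replicate]
          split <;> simp
      · have hpos : 0 < n := by omega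
        have hNpos : 0 < N := by omega
        rw [altG, if_neg hneg, if_neg h0]
        simp only
        rw [PySem.List.getD_map_range _ _ _ _ hs]
        have hq : PySem.Int.floordiv n 10 = ((N / 10 : ℕ) : Int) := by
          have hn : n = ((N : ℕ) : Int) := by omega
          rw [hn]
          exact_mod_cast PySem.Int.floordiv_natCast N 10
        have hr : PySem.Int.mod n 10 = ((N % 10 : ℕ) : Int) := by
          have hn : n = ((N : ℕ) : Int) := by omega
          rw [hn]
          exact_mod_cast PySem.Int.mod_natCast N 10
        rw [sum_filter_bridge s]
        have h2 : (n + 1).toNat = N + 1 := by omega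
        rw [h2, pvCB_rec (N + 1) s]
        push_cast
        apply Finset.sum_congr rfl
        intro d hd
        have hd10 : d < 10 := Finset.mem_range.mp hd
        by_cases hds : d ≤ s
        · rw [if_pos hds, if_pos hds]
          have hsd : s - d < 101 := by omega
          rw [apply_ite (fun (l : List Int) => l.getD (s - d) 0), hq, hr]
          have e1 : ((((N / 10 : ℕ) : Int)) + 1).toNat = N / 10 + 1 := by omega
          have e2 : ((((N / 10 : ℕ) : Int)) - 1 + 1).toNat = N / 10 := by omega
          have ha : (altG ((N / 10 : ℕ) : Int)).getD (s - d) 0 = (pvCB (N / 10 + 1) (s - d) : Int) := by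
            rw [ih (N / 10) (by omega) ((N / 10 : ℕ) : Int) (by omega) (s - d) hsd, e1]
          have hb : (altG (((N / 10 : ℕ) : Int) - 1)).getD (s - d) 0 = (pvCB (N / 10) (s - d) : Int) := by
            rw [ih (N / 10 - 1) (by omega) (((N / 10 : ℕ) : Int) - 1) (by omega) (s - d) hsd, e2]
          rw [ha, hb]
          have hcond : (((d : ℕ) : Int) ≤ ((N % 10 : ℕ) : Int)) ↔ d ≤ N % 10 := Nat.cast_le
          by_cases hc : d ≤ N % 10
          · rw [if_pos (hcond.mpr hc)]
            have hx : (N + 1 - d + 9) / 10 = N / 10 + 1 := by omega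
            rw [hx]
          · rw [if_neg (fun hx => hc (hcond.mp hx))]
            have hx : (N + 1 - d + 9) / 10 = N / 10 := by omega
            rw [hx]
        · rw [if_neg hds, if_neg hds]

def pvDSI (i : Int) : Int := (pvDS i.toNat : Int)

def MemoOK (memo : Std.HashMap Int Int) : Prop :=
  ∀ k v, memo[k]? = some v → v = pvDSI k

lemma helperA_spec : ∀ (N : ℕ) (num : Int), num.toNat = N → 0 ≤ num →
    ∀ memo, MemoOK memo →
    (helperA num memo).1 = pvDSI num ∧ MemoOK (helperA num memo).2 := by
  intro N
  induction N using Nat.strong_induction_on with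
  | _ N ih =>
    intro num hN hnn memo hok
    by_cases h0 : num = 0
    · subst h0
      rw [helperA]
      exact ⟨by simp [pvDSI, pvDS], hok⟩
    · rw [helperA, if_neg h0, if_neg (by omega)]
      cases hget : memo[num]? with
      | some v =>
        simp only
        exact ⟨hok num v hget, hok⟩
      | none =>
        simp only
        have hq : PySem.Int.floordiv num 10 = ((num.toNat / 10 : ℕ) : Int) := by
          have hn : num = ((num.toNat : ℕ) : Int) := by omega
          rw [hn]
          exact_mod_cast PySem.Int.floordiv_natCast num.toNat 10
        have hr : PySem.Int.mod num 10 = ((num.toNat % 10 : ℕ) : Int) := by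
          have hn : num = ((num.toNat : ℕ) : Int) := by omega
          rw [hn]
          exact_mod_cast PySem.Int.mod_natCast num.toNat 10
        obtain ⟨ih1, ih2⟩ := ih (num.toNat / 10) (by omega) (PySem.Int.floordiv num 10)
          (by rw [hq]; omega) (by rw [hq]; omega) memo hok
        have hval : PySem.Int.mod num 10 + (helperA (PySem.Int.floordiv num 10) memo).1
            = pvDSI num := by
          rw [ih1, hr, hq, pvDSI, pvDSI]
          have ht : ((num.toNat / 10 : ℕ) : Int).toNat = num.toNat / 10 := by omega
          rw [ht, pvDS_eq num.toNat]
          push_cast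
          ring
        constructor
        · exact hval
        · intro k v hkv
          rw [Std.HashMap.getElem?_insert] at hkv
          split at hkv
          · next h =>
            rw [beq_iff_eq] at h
            subst h
            rw [← Option.some_inj.mp hkv, hval]
          · next h => exact ih2 k v hkv

lemma foldA_eq (l : List Int) (hl : ∀ x ∈ l, 0 ≤ x) :
    ∀ memo mpp, MemoOK memo →
    (l.foldl (fun (st : Std.HashMap Int Int × PySem.Dict Int Int) (i : Int) =>
      let r1 := helperA i st.1
      let newv := st.2.getD r1.1 0 + 1
      let r2 := helperA i r1.2
      (r2.2, st.2.insert r2.1 newv)) (memo, mpp)).2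
    = (l.map pvDSI).foldl (fun (d : PySem.Dict Int Int) (x : Int) => d.insert x (d.getD x 0 + 1)) mpp := by
  induction l with
  | nil => intro memo mpp hok; rfl
  | cons x t iht =>
    intro memo mpp hok
    have hx : 0 ≤ x := hl x (by simp)
    obtain ⟨h1, h2⟩ := helperA_spec x.toNat x rfl hx memo hok
    obtain ⟨h3, h4⟩ := helperA_spec x.toNat x rfl hx _ h2
    simp only [List.foldl_cons, List.map_cons]
    rw [h1, h3]
    exact iht (fun y hy => hl y (by simp [hy])) _ _ h4

-- the memo dict only ever holds correct tables
def TablesOK (tables : Std.HashMap Int (List Int)) : Prop :=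
  ∀ k t, tables[k]? = some t → t = altG k

lemma altGM_spec : ∀ (N : ℕ) (n : Int), n.toNat = N → ∀ tables, TablesOK tables →
    (altGM n tables).1 = altG n ∧ TablesOK (altGM n tables).2 := by
  intro N
  induction N using Nat.strong_induction_on with
  | _ N ih =>
    intro n hN tables htok
    by_cases hneg : n < 0
    · rw [altGM, if_pos hneg, altG, if_pos hneg]
      exact ⟨rfl, htok⟩
    · by_cases h0 : n = 0
      · subst h0
        rw [altGM, altG]
        norm_num
        exact htok
      · rw [altGM, if_neg hneg, if_neg h0]
        cases hget : tables[n]? with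
        | some t => exact ⟨htok n t hget, htok⟩
        | none =>
          simp only
          have hq : (PySem.Int.floordiv n 10).toNat < N := by
            rw [PySem.Int.floordiv_eq_ediv_of_pos (by norm_num)]; omega
          have hq1 : (PySem.Int.floordiv n 10 - 1).toNat < N := by
            rw [PySem.Int.floordiv_eq_ediv_of_pos (by norm_num)]; omega
          obtain ⟨ha1, ha2⟩ := ih _ hq (PySem.Int.floordiv n 10) rfl tables htok
          obtain ⟨hb1, hb2⟩ := ih _ hq1 (PySem.Int.floordiv n 10 - 1) rfl _ ha2
          have hout : (List.range 101).map (fun s =>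
              (((List.range 10).filter (fun d => d ≤ s)).map
                (fun (d : Nat) => (if (d : Int) ≤ PySem.Int.mod n 10
                  then (altGM (PySem.Int.floordiv n 10) tables).1
                  else (altGM (PySem.Int.floordiv n 10 - 1) (altGM (PySem.Int.floordiv n 10) tables).2).1).getD (s - d : Nat) 0)).sum)
              = altG n := by
            rw [ha1, hb1]
            conv_rhs => rw [altG, if_neg hneg, if_neg h0]
          constructor
          · exact hout
          · intro k t hkt
            rw [Std.HashMap.getElem?_insert] at hkt
            split at hkt
            · next h =>
              rw [beq_iff_eq] at h
              subst h
              rw [← Option.some_inj.mp hkt, hout]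
            · next h => exact hb2 k t hkt

def pvM (lowVal highVal : Int) : List Int :=
  (PySem.List.pyRange lowVal (highVal + 1) 1).map pvDSI

def pvOut (vals : List Int) : List Int :=
  match PySem.List.max? vals (fun v => v) with
  | none => []
  | some maxCount =>
    [maxCount, vals.foldl (fun acc val => if val = maxCount then acc + 1 else acc) 0]

def pvOutB (cnt : List Int) : List Int :=
  match PySem.List.max? (cnt.filter (fun c => decide (0 < c))) (fun v => v) with
  | none => []
  | some best => [best, (cnt.count best : Int)]

lemma count_m (lowVal highVal : Int) (hlo : 0 ≤ lowVal) (hle : lowVal ≤ highVal + 1) (s : ℕ) :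
    pvCB lowVal.toNat s + (pvM lowVal highVal).count ((s : ℕ) : Int) = pvCB (highVal + 1).toNat s := by
  unfold pvM
  rw [PySem.List.pyRange_one, List.map_map, List.count_eq_countP, List.countP_map]
  have hN : (highVal + 1).toNat = lowVal.toNat + (highVal + 1 - lowVal).toNat := by omega
  rw [hN]
  show _ + _ = pvCB (lowVal.toNat + (highVal + 1 - lowVal).toNat) s
  conv_rhs => rw [pvCB, List.range_add, List.countP_append, List.countP_map]
  congr 1
  apply List.countP_congr
  intro k hk
  have ht : (lowVal + (k : Int)).toNat = lowVal.toNat + k := by omega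
  simp only [Function.comp_apply, pvDSI, ht, beq_iff_eq, Nat.cast_inj, decide_eq_true_eq]

lemma m_elts (lowVal highVal : Int) (hhigh : highVal ≤ 2147483648) :
    ∀ t ∈ pvM lowVal highVal, ∃ s : ℕ, s < 101 ∧ t = (s : Int) := by
  intro t ht
  obtain ⟨x, hx, rfl⟩ := List.mem_map.mp ht
  have hx' := PySem.List.mem_pyRange_one.mp hx
  refine ⟨pvDS x.toNat, ?_, rfl⟩
  have hb : x.toNat < 10 ^ 10 := by omega
  have hd := pvDS_le 10 x.toNat hb
  omega

lemma cnt_eq (lowVal highVal : Int) (hlo : 0 ≤ lowVal) (hle : lowVal ≤ highVal) :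
    ((altG highVal).zip (altG (lowVal - 1))).map (fun p => p.1 - p.2)
    = (List.range 101).map (fun s => ((pvM lowVal highVal).count ((s : ℕ) : Int) : Int)) := by
  apply List.ext_getElem
  · simp [altG_length]
  · intro i h1 h2
    have hi : i < 101 := by simpa using h2
    have hiz : i < ((altG highVal).zip (altG (lowVal - 1))).length := by
      simp [altG_length]; omega
    simp only [List.getElem_map, List.getElem_zip, List.getElem_range]
    have e1 : (altG highVal)[i]'(by rw [altG_length]; exact hi) = (altG highVal).getD i 0 :=
      (List.getD_eq_getElem _ 0 (by rw [altG_length]; exact hi)).symm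
    have e2 : (altG (lowVal - 1))[i]'(by rw [altG_length]; exact hi) = (altG (lowVal - 1)).getD i 0 :=
      (List.getD_eq_getElem _ 0 (by rw [altG_length]; exact hi)).symm
    rw [e1, e2, altG_spec highVal.toNat highVal rfl i hi,
        altG_spec (lowVal - 1).toNat (lowVal - 1) rfl i hi]
    have e3 : lowVal - 1 + 1 = lowVal := by ring
    rw [e3]
    have := count_m lowVal highVal hlo (by omega) i
    omega

lemma out_eq (m : List Int)
    (helts : ∀ t ∈ m, ∃ s : ℕ, s < 101 ∧ t = (s : Int))
    (hne : m ≠ []) :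
    pvOut ((PySem.Set.ofList m).map (fun k => ((m.count k : ℕ) : Int)))
    = pvOutB ((List.range 101).map (fun s => ((m.count ((s : ℕ) : Int) : ℕ) : Int))) := by
  set K := PySem.Set.ofList m with hK
  set cf : Int → Int := fun k => ((m.count k : ℕ) : Int) with hcf
  set cg : ℕ → Int := fun s => ((m.count ((s : ℕ) : Int) : ℕ) : Int) with hcg
  set VA : List Int := K.map cf with hVA
  set cntR : List Int := (List.range 101).map cg with hcntR
  set VB : List Int := cntR.filter (fun c => decide (0 < c)) with hVB
  -- membership transfer
  have hmem : ∀ v, v ∈ VA ↔ v ∈ VB := by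
    intro v
    constructor
    · intro hv
      obtain ⟨k, hk, rfl⟩ := List.mem_map.mp hv
      have hkm : k ∈ m := (PySem.Set.mem_ofList m k).mp hk
      obtain ⟨s, hs, rfl⟩ := helts k hkm
      rw [hVB, List.mem_filter]
      refine ⟨List.mem_map.mpr ⟨s, List.mem_range.mpr hs, rfl⟩, ?_⟩
      simp only [decide_eq_true_eq, hcf]
      exact_mod_cast List.count_pos_iff.mpr hkm
    · intro hv
      rw [hVB, List.mem_filter] at hv
      obtain ⟨hv1, hv2⟩ := hv
      obtain ⟨s, hs, rfl⟩ := List.mem_map.mp hv1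
      have hpos : 0 < m.count ((s : ℕ) : Int) := by
        simp only [hcg, decide_eq_true_eq] at hv2
        exact_mod_cast hv2
      have hkm : ((s : ℕ) : Int) ∈ m := List.count_pos_iff.mp hpos
      exact List.mem_map.mpr ⟨((s : ℕ) : Int), (PySem.Set.mem_ofList m _).mpr hkm, rfl⟩
  -- nonemptiness
  obtain ⟨t0, ht0⟩ := List.exists_mem_of_ne_nil m hne
  have hVAne : VA ≠ [] := by
    have : cf t0 ∈ VA := List.mem_map.mpr ⟨t0, (PySem.Set.mem_ofList m t0).mpr ht0, rfl⟩
    exact List.ne_nil_of_mem this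
  have hVBne : VB ≠ [] := by
    have : cf t0 ∈ VA := List.mem_map.mpr ⟨t0, (PySem.Set.mem_ofList m t0).mpr ht0, rfl⟩
    exact List.ne_nil_of_mem ((hmem _).mp this)
  -- maxima
  obtain ⟨MA, hMA⟩ : ∃ MA, PySem.List.max? VA (fun v => v) = some MA := by
    cases h : PySem.List.max? VA (fun v => v) with
    | none => exact absurd ((PySem.List.max?_eq_none_iff _ _).mp h) hVAne
    | some x => exact ⟨x, rfl⟩
  obtain ⟨MB, hMB⟩ : ∃ MB, PySem.List.max? VB (fun v => v) = some MB := by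
    cases h : PySem.List.max? VB (fun v => v) with
    | none => exact absurd ((PySem.List.max?_eq_none_iff _ _).mp h) hVBne
    | some x => exact ⟨x, rfl⟩
  have hMAB : MA = MB := by
    have h1 : MA ∈ VB := (hmem MA).mp (PySem.List.max?_mem hMA)
    have h2 : MB ∈ VA := (hmem MB).mpr (PySem.List.max?_mem hMB)
    exact le_antisymm (PySem.List.max?_isMax hMB MA h1) (PySem.List.max?_isMax hMA MB h2)
  -- positivity of the max
  have hMpos : 0 < MB := by
    have := PySem.List.max?_mem hMB
    rw [hVB, List.mem_filter] at this
    simpa using this.2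
  -- count of maximal values agree
  have hcount : VA.countP (fun val => decide (val = MB)) = cntR.countP (fun c => c == MB) := by
    rw [hVA, hcntR, List.countP_map, List.countP_map]
    have hKnd : K.Nodup := PySem.Set.nodup_ofList m
    set pK : Int → Bool := fun k => decide (cf k = MB) with hpK
    set pR : ℕ → Bool := fun s => decide (cg s = MB) with hpR
    have hq : ((fun c => c == MB) ∘ cg) = pR := by
      funext s
      by_cases h : cg s = MB <;> simp [hpR, hcg, hcg ▸ h]
    have hp : ((fun val => decide (val = MB)) ∘ cf) = pK := by
      funext k; simp [hpK, hcf]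
    rw [hq, hp]
    -- both count the same finite set of digit sums
    have hperm : ((K.filter pK).map Int.toNat).Perm ((List.range 101).filter pR) := by
      apply List.perm_of_nodup_nodup_toFinset_eq
      · apply (List.nodup_map_iff_inj_on (hKnd.filter pK)).mpr
        intro x hx y hy hxy
        have hxK : x ∈ m := (PySem.Set.mem_ofList m x).mp (List.mem_filter.mp hx).1
        have hyK : y ∈ m := (PySem.Set.mem_ofList m y).mp (List.mem_filter.mp hy).1
        obtain ⟨sx, _, rfl⟩ := helts x hxK
        obtain ⟨sy, _, rfl⟩ := helts y hyK
        omega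
      · exact (List.nodup_range).filter pR
      · apply Finset.ext
        intro a
        simp only [List.mem_toFinset, List.mem_map, List.mem_filter, List.mem_range]
        constructor
        · rintro ⟨k, ⟨hkK, hkp⟩, rfl⟩
          have hkm : k ∈ m := (PySem.Set.mem_ofList m k).mp hkK
          obtain ⟨s, hs, rfl⟩ := helts k hkm
          have : ((s : ℕ) : Int).toNat = s := by omega
          rw [this]
          refine ⟨hs, ?_⟩
          simpa [hpK, hpR, hcf, hcg] using hkp
        · rintro ⟨ha, hap⟩
          refine ⟨((a : ℕ) : Int), ⟨?_, ?_⟩, by omega⟩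
          · have hcga : ((List.count ((a : ℕ) : Int) m : ℕ) : Int) = MB := by
              simpa [hpR, hcg] using hap
            have hpos : 0 < List.count ((a : ℕ) : Int) m := by omega
            exact (PySem.Set.mem_ofList m _).mpr (List.count_pos_iff.mp hpos)
          · simpa [hpK, hpR, hcf, hcg] using hap
    have := hperm.length_eq
    rw [List.length_map, ← List.countP_eq_length_filter, ← List.countP_eq_length_filter] at this
    exact this
  -- assemble
  rw [pvOut, pvOutB, hMA]
  show _ = (match PySem.List.max? VB (fun v => v) with
    | none => []
    | some best => [best, ((cntR.count best : ℕ) : Int)])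
  rw [hMB]
  simp only
  rw [hMAB]
  congr 1
  rw [PySem.List.foldl_ite_add_one (fun val => val = MB) VA 0, hcount, List.count_eq_countP]
  simp

theorem pv_main (lowVal highVal : Int)
    (hdom : Dom_findGroup_memo lowVal highVal)
    (hlo : 0 ≤ lowVal) (hle : lowVal ≤ highVal) :
    findGroup_memo lowVal highVal = findGroup_memo_alt lowVal highVal := by
  have hhigh : highVal ≤ 2147483648 := by
    simp [Dom_findGroup_memo, pvDomInt] at hdom
    exact hdom.2.2
  have hok : MemoOK (∅ : Std.HashMap Int Int) := by
    intro k v h; simp at h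
  have hL : ∀ x ∈ PySem.List.pyRange lowVal (highVal + 1) 1, 0 ≤ x := by
    intro x hx
    have := PySem.List.mem_pyRange_one.mp hx
    omega
  -- A's dict-building loop is the counting fold over the digit sums
  have hA : findGroup_memo lowVal highVal
      = pvOut ((((PySem.List.pyRange lowVal (highVal + 1) 1).foldl
          (fun (st : Std.HashMap Int Int × PySem.Dict Int Int) (i : Int) =>
            let r1 := helperA i st.1
            let newv := st.2.getD r1.1 0 + 1
            let r2 := helperA i r1.2
            (r2.2, st.2.insert r2.1 newv))
          ((∅ : Std.HashMap Int Int), PySem.Dict.empty)).2).values) := rfl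
  rw [foldA_eq _ hL (∅ : Std.HashMap Int Int) PySem.Dict.empty hok] at hA
  rw [show (PySem.List.pyRange lowVal (highVal + 1) 1).map pvDSI = pvM lowVal highVal from rfl] at hA
  set D := ((pvM lowVal highVal).foldl
      (fun (d : PySem.Dict Int Int) (x : Int) => d.insert x (d.getD x 0 + 1)) PySem.Dict.empty) with hD
  have hKeys : D.keys = PySem.Set.ofList (pvM lowVal highVal) := by
    rw [hD, pvM]
    rw [PySem.Dict.keys_foldl_insert]
    rfl
  have hnd : D.keys.Nodup := by
    rw [hKeys]; exact PySem.Set.nodup_ofList _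
  have hgv : ∀ v, D.getD v 0 = (((pvM lowVal highVal).count v : ℕ) : Int) := by
    intro v
    rw [hD, PySem.Dict.getD_foldl_insert_add_one, PySem.Dict.getD_empty, zero_add]
  have hvals : D.values = (PySem.Set.ofList (pvM lowVal highVal)).map
      (fun k => (((pvM lowVal highVal).count k : ℕ) : Int)) := by
    rw [PySem.Dict.values_eq_map_keys D hnd 0, hKeys]
    exact List.map_congr_left (fun k _ => hgv k)
  rw [hvals] at hA
  -- B's table is the per-digit-sum count table
  have hok2 : TablesOK (∅ : Std.HashMap Int (List Int)) := by
    intro k t h; simp at h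
  obtain ⟨hg1, hg1t⟩ := altGM_spec highVal.toNat highVal rfl (∅ : Std.HashMap Int (List Int)) hok2
  obtain ⟨hg2, _⟩ := altGM_spec (lowVal - 1).toNat (lowVal - 1) rfl
    (altGM highVal (∅ : Std.HashMap Int (List Int))).2 hg1t
  have hB : findGroup_memo_alt lowVal highVal
      = pvOutB (((altGM highVal (∅ : Std.HashMap Int (List Int))).1.zip
          ((altGM (lowVal - 1) (altGM highVal (∅ : Std.HashMap Int (List Int))).2).1)).map
          (fun p => p.1 - p.2)) := rfl
  rw [hg1, hg2, cnt_eq lowVal highVal hlo hle] at hB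
  -- nonempty range
  have hm_ne : pvM lowVal highVal ≠ [] := by
    apply List.ne_nil_of_length_pos
    rw [pvM, List.length_map, PySem.List.length_pyRange_one]
    omega
  rw [hA, hB]
  exact out_eq (pvM lowVal highVal) (m_elts lowVal highVal hhigh) hm_ne


-- ===== VERDICT (by name: the statement is the Claim_ definition above) =====
theorem findGroup_memo_spec : Claim_equal_findGroup_memo := by
  intro lowVal highVal hdom hpre
  unfold Spec_findGroup_memo
  exact pv_main lowVal highVal hdom hpre.1 hpre.2
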